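-- pv_equiv track=rewrite | github.com/joie-zhang/bargain | analyze_number_of_runs_in_heatmap.py | get_models_with_data
-- ===== SOURCE A (Python) =====
-- MMLU_PRO_SCORES = {
--     # Strong models we're looking for
--     'claude-3-5-haiku': 64.1,
--     'claude-3-5-sonnet': 78.4,
--     'claude-4-1-opus': 87.8,
--     'claude-4-sonnet': 79.4,
--     'gemma-3-27b': 67.5,
--     'gemini-2-0-flash': 77.4,
--     'gemini-2-5-pro': 84.1,
--     'gpt-4o-mini': 62.7,
--     'gpt-4o-2024-11-20': 69.1,
--     'o1': 83.5,
--     'o3': 85.6,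
--
--     # Baseline models
--     'gpt-4o-2024-05-13': 72.55,
--     'gemini-1-5-pro': 75.3,
--     'claude-3-opus': 68.45,
-- }
--
-- def get_models_with_data(results_by_competition):
--     """Get the list of strong models that actually have data, ordered by MMLU-Pro score."""
--     models_with_data = set()
--     for comp_level in results_by_competition:
--         for baseline in results_by_competition[comp_level]:
--             for strong in results_by_competition[comp_level][baseline]:
--                 if results_by_competition[comp_level][baseline][strong]:
--                     models_with_data.add(strong)
--
--     models_with_scores = []
--     for model in models_with_data:
--         if model in MMLU_PRO_SCORES and MMLU_PRO_SCORES[model] is not None: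
--             models_with_scores.append((model, MMLU_PRO_SCORES[model]))
--
--     models_with_scores.sort(key=lambda x: x[1])
--
--     return [model for model, score in models_with_scores]
-- ===== SOURCE B (Python) =====
-- MMLU_PRO_SCORES = {
--     'claude-3-5-haiku': 64.1,
--     'claude-3-5-sonnet': 78.4,
--     'claude-4-1-opus': 87.8,
--     'claude-4-sonnet': 79.4,
--     'gemma-3-27b': 67.5,
--     'gemini-2-0-flash': 77.4,
--     'gemini-2-5-pro': 84.1,
--     'gpt-4o-mini': 62.7,
--     'gpt-4o-2024-11-20': 69.1,
--     'o1': 83.5,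
--     'o3': 85.6,
--     'gpt-4o-2024-05-13': 72.55,
--     'gemini-1-5-pro': 75.3,
--     'claude-3-opus': 68.45,
-- }
--
-- # The candidate table, pre-sorted once by MMLU-Pro score (all scores are distinct).
-- SORTED_MODELS = sorted(MMLU_PRO_SCORES, key=MMLU_PRO_SCORES.get)
--
--
-- def get_models_with_data(results_by_competition):
--     """Get the list of strong models that actually have data, ordered by MMLU-Pro score."""
--     models_with_data = {
--         strong
--         for baselines in results_by_competition.values()
--         for strongs in baselines.values()
--         for strong, games in strongs.items()
--         if games
--     }
--     return [m for m in SORTED_MODELS if m in models_with_data]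
-- ===== Notes on version B (the rewrite author's own statement) =====
-- stated objective: idiomatic
-- what changed: Instead of collecting (model, score) pairs from the set and sorting them, B pre-sorts the fixed score table once at module load and returns that sorted candidate list filtered by membership in the set of models with data (collected by a single set comprehension); correct because all scores in the table are distinct.
import Mathlib
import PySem

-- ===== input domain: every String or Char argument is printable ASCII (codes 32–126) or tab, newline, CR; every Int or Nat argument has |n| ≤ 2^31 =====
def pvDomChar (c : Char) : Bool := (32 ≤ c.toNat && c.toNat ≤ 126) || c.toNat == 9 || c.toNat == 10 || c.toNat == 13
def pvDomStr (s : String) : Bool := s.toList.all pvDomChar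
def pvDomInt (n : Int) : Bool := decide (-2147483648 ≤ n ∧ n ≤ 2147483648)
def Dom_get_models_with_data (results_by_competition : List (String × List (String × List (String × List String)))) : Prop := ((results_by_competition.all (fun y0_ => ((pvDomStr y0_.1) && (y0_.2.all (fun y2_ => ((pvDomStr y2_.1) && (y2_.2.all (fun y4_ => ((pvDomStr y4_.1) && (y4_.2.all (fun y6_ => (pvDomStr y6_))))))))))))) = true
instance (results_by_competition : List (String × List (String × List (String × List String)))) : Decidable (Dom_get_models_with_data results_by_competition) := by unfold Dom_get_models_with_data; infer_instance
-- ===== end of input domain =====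

-- B changes the decomposition: the fixed score table is sorted once and filtered by membership,
-- instead of collecting (model, score) pairs from the set and sorting them per call (idiomatic; not faster).

-- ===== PORT A =====
-- MMLU_PRO_SCORES: float scores represented exactly as score*100 : Int (all values have two decimals,
-- so comparisons/sorting by these Ints are exactly the float comparisons; the floats never appear in the output).
def pvScores : List (String × Int) :=
  [("claude-3-5-haiku", 6410), ("claude-3-5-sonnet", 7840), ("claude-4-1-opus", 8780),
   ("claude-4-sonnet", 7940), ("gemma-3-27b", 6750), ("gemini-2-0-flash", 7740),
   ("gemini-2-5-pro", 8410), ("gpt-4o-mini", 6270), ("gpt-4o-2024-11-20", 6910),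
   ("o1", 8350), ("o3", 8560), ("gpt-4o-2024-05-13", 7255), ("gemini-1-5-pro", 7530),
   ("claude-3-opus", 6845)]

-- MMLU_PRO_SCORES[m] / 'm in MMLU_PRO_SCORES': first-match lookup in the literal table (keys distinct)
def pvScore? (m : String) : Option Int := (pvScores.find? (fun p => p.1 == m)).map (·.2)

-- the triple-nested loop building the set models_with_data ('for comp_level …: for baseline …: for strong …')
def pvCollectA (results_by_competition : List (String × List (String × List (String × List String)))) : PySem.Set String :=
  results_by_competition.foldl (fun s cl =>
    cl.2.foldl (fun s bl =>
      bl.2.foldl (fun s st =>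
        if st.2.isEmpty then s else PySem.Set.add s st.1) s) s) PySem.Set.empty

def get_models_with_data (results_by_competition : List (String × List (String × List (String × List String)))) : List String :=
  let models_with_data := pvCollectA results_by_competition
  -- 'if model in MMLU_PRO_SCORES and MMLU_PRO_SCORES[model] is not None' (no value is None)
  let models_with_scores :=
    models_with_data.foldl (fun acc m =>
      match pvScore? m with
      | some v => acc ++ [(m, v)]
      | none => acc) []
  (PySem.List.sorted models_with_scores (fun p => p.2) false).map (·.1)

-- ===== PORT B =====
-- SORTED_MODELS = sorted(MMLU_PRO_SCORES, key=MMLU_PRO_SCORES.get); every key is in the table, so .get is (pvScore? m).getD 0 here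
def pvSortedModels : List String :=
  PySem.List.sorted (pvScores.map (·.1)) (fun m => (pvScore? m).getD 0) false

def get_models_with_data_alt (results_by_competition : List (String × List (String × List (String × List String)))) : List String :=
  let models_with_data : PySem.Set String :=
    PySem.Set.ofList
      ((results_by_competition.map (·.2)).flatMap (fun baselines =>
        (baselines.map (·.2)).flatMap (fun strongs =>
          (strongs.filter (fun p => !p.2.isEmpty)).map (·.1))))
  pvSortedModels.filter (fun m => PySem.Set.contains models_with_data m)

-- ===== PRECONDITION & SPEC =====
def Spec_get_models_with_data (results_by_competition : List (String × List (String × List (String × List String)))) (out : List String) : Prop := out = get_models_with_data_alt results_by_competition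
instance (results_by_competition : List (String × List (String × List (String × List String)))) (out : List String) : Decidable (Spec_get_models_with_data results_by_competition out) := by unfold Spec_get_models_with_data; infer_instance

-- ===== CLAIM (what is proved, stated in full; the proofs are below) =====
def Claim_equal_get_models_with_data : Prop := ∀ (results_by_competition : List (String × List (String × List (String × List String)))), Dom_get_models_with_data results_by_competition → Spec_get_models_with_data results_by_competition (get_models_with_data results_by_competition)

-- ===== LEMMAS AND PROOFS =====

-- generic: membership in a set-valued foldl whose step g adds exactly the elements satisfying P
theorem pv_mem_foldl_set {α : Type} (g : PySem.Set String → α → PySem.Set String)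
    (P : String → α → Prop) (h : ∀ s x y, y ∈ g s x ↔ y ∈ s ∨ P y x) :
    ∀ (l : List α) (s : PySem.Set String) (y : String),
      y ∈ l.foldl g s ↔ y ∈ s ∨ ∃ x ∈ l, P y x := by
  intro l
  induction l with
  | nil => simp
  | cons a t ih =>
    intro s y
    simp only [List.foldl_cons, ih, h, List.mem_cons]
    constructor
    · rintro ((hs | hp) | ⟨x, hx, hpx⟩)
      · exact Or.inl hs
      · exact Or.inr ⟨a, Or.inl rfl, hp⟩
      · exact Or.inr ⟨x, Or.inr hx, hpx⟩
    · rintro (hs | ⟨x, (rfl | hx), hpx⟩)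
      · exact Or.inl (Or.inl hs)
      · exact Or.inl (Or.inr hpx)
      · exact Or.inr ⟨x, hx, hpx⟩

theorem pv_nodup_foldl_set {α : Type} (g : PySem.Set String → α → PySem.Set String)
    (h : ∀ s x, s.Nodup → (g s x).Nodup) :
    ∀ (l : List α) (s : PySem.Set String), s.Nodup → (l.foldl g s).Nodup := by
  intro l
  induction l with
  | nil => intro s hs; simpa using hs
  | cons a t ih => intro s hs; exact ih _ (h s a hs)

theorem pvCollectA_mem (rbc : List (String × List (String × List (String × List String)))) (y : String) :
    y ∈ pvCollectA rbc ↔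
      ∃ cl ∈ rbc, ∃ bl ∈ cl.2, ∃ st ∈ bl.2, st.2.isEmpty = false ∧ y = st.1 := by
  unfold pvCollectA
  rw [pv_mem_foldl_set _ (fun y cl => ∃ bl ∈ cl.2, ∃ st ∈ bl.2, st.2.isEmpty = false ∧ y = st.1)]
  · simp [PySem.Set.empty]
  · intro s cl y
    rw [pv_mem_foldl_set _ (fun y bl => ∃ st ∈ bl.2, st.2.isEmpty = false ∧ y = st.1)]
    intro s bl y
    rw [pv_mem_foldl_set _ (fun y st => st.2.isEmpty = false ∧ y = st.1)]
    intro s st y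
    by_cases h : st.2.isEmpty
    · simp [h]
    · simp [h, PySem.Set.mem_add]

theorem pvCollectA_nodup (rbc : List (String × List (String × List (String × List String)))) :
    (pvCollectA rbc).Nodup := by
  unfold pvCollectA
  apply pv_nodup_foldl_set
  · intro s cl hs
    apply pv_nodup_foldl_set _ _ _ _ hs
    intro s bl hs
    apply pv_nodup_foldl_set _ _ _ _ hs
    intro s st hs
    by_cases h : st.2.isEmpty
    · simpa [h] using hs
    · simpa [h] using PySem.Set.nodup_add s st.1 hs
  · simp [PySem.Set.empty]

-- the generated list of B's set comprehension has the same members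
theorem pvCollectB_mem (rbc : List (String × List (String × List (String × List String)))) (y : String) :
    y ∈ ((rbc.map (·.2)).flatMap (fun baselines =>
            (baselines.map (·.2)).flatMap (fun strongs =>
              (strongs.filter (fun p => !p.2.isEmpty)).map (·.1)))) ↔
      ∃ cl ∈ rbc, ∃ bl ∈ cl.2, ∃ st ∈ bl.2, st.2.isEmpty = false ∧ y = st.1 := by
  simp only [List.mem_flatMap, List.mem_map, List.mem_filter]
  constructor
  · rintro ⟨b, ⟨cl, hcl, rfl⟩, g, ⟨bl, hbl, rfl⟩, st, ⟨hst, hne⟩, rfl⟩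
    exact ⟨cl, hcl, bl, hbl, st, hst, by simpa using hne, rfl⟩
  · rintro ⟨cl, hcl, bl, hbl, st, hst, hne, rfl⟩
    exact ⟨cl.2, ⟨cl, hcl, rfl⟩, bl.2, ⟨bl, hbl, rfl⟩, st, ⟨hst, by simpa using hne⟩, rfl⟩

-- A's accumulation loop is a filterMap
theorem pv_foldl_scores (l : List String) (acc : List (String × Int)) :
    l.foldl (fun acc m => match pvScore? m with
      | some v => acc ++ [(m, v)]
      | none => acc) acc
    = acc ++ l.filterMap (fun m => (pvScore? m).map (fun v => (m, v))) := by
  induction l generalizing acc with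
  | nil => simp
  | cons a t ih =>
    simp only [List.foldl_cons, List.filterMap_cons]
    cases h : pvScore? a <;> simp [h, ih]

-- first-match assoc lookup in a table with distinct keys finds exactly the table's pairs
theorem pv_assoc_find (ps : List (String × Int)) (hk : (ps.map Prod.fst).Nodup)
    (m : String) (v : Int) :
    ((ps.find? (fun p => p.1 == m)).map (·.2) = some v) ↔ (m, v) ∈ ps := by
  induction ps with
  | nil => simp
  | cons a t ih =>
    simp only [List.map_cons, List.nodup_cons] at hk
    by_cases h : a.1 = m
    · subst h
      rw [List.find?_cons_of_pos (by simp)]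
      simp only [Option.map_some, Option.some.injEq, List.mem_cons]
      constructor
      · rintro rfl; exact Or.inl rfl
      · rintro (he | ht)
        · exact (congrArg Prod.snd he).symm
        · exact absurd (List.mem_map.mpr ⟨(a.1, v), ht, rfl⟩) hk.1
    · rw [List.find?_cons_of_neg (by simp [h]), ih hk.2]
      simp only [List.mem_cons]
      constructor
      · exact Or.inr
      · rintro (he | ht)
        · exact absurd (congrArg Prod.fst he).symm h
        · exact ht

theorem pvScores_keys_nodup : (pvScores.map Prod.fst).Nodup := by decide

-- the sorted table, as a literal
def pvTlit : List (String × Int) :=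
  [("gpt-4o-mini", 6270), ("claude-3-5-haiku", 6410), ("gemma-3-27b", 6750),
   ("claude-3-opus", 6845), ("gpt-4o-2024-11-20", 6910), ("gpt-4o-2024-05-13", 7255),
   ("gemini-1-5-pro", 7530), ("gemini-2-0-flash", 7740), ("claude-3-5-sonnet", 7840),
   ("claude-4-sonnet", 7940), ("o1", 8350), ("gemini-2-5-pro", 8410),
   ("o3", 8560), ("claude-4-1-opus", 8780)]

theorem pvSortedModels_eq : pvSortedModels = pvTlit.map Prod.fst := by decide

theorem pvTlit_perm : pvTlit.Perm pvScores := by decide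

theorem pvTlit_pairwise : pvTlit.Pairwise (fun a b => a.2 < b.2) := by decide

theorem pv_mem_Tlit (m : String) (v : Int) : (m, v) ∈ pvTlit ↔ pvScore? m = some v := by
  rw [pvTlit_perm.mem_iff, ← pv_assoc_find pvScores pvScores_keys_nodup]
  unfold pvScore?
  cases h : pvScores.find? (fun p => p.1 == m) <;> simp

-- map fst of A's filterMap is a filter of the source list
theorem pv_map_fst_filterMap (l : List String) :
    (l.filterMap (fun m => (pvScore? m).map (fun v => (m, v)))).map Prod.fst
      = l.filter (fun m => (pvScore? m).isSome) := by
  induction l with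
  | nil => rfl
  | cons a t ih => cases h : pvScore? a <;> simp [List.filterMap_cons, h, ih, List.filter_cons]

-- central lemma: for any Nodup source set s, sorting A's collected pairs by score
-- yields exactly the pre-sorted table filtered by membership in s
theorem pv_sorted_filterMap (s : List String) (hs : s.Nodup) :
    (PySem.List.sorted (s.filterMap (fun m => (pvScore? m).map (fun v => (m, v))))
        (fun p => p.2) false).map Prod.fst
      = (pvTlit.map Prod.fst).filter (fun m => decide (m ∈ s)) := by
  set L := s.filterMap (fun m => (pvScore? m).map (fun v => (m, v))) with hL
  set ys := pvTlit.filter (fun p => decide (p.1 ∈ s)) with hys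
  have hLnodup : L.Nodup := by
    apply List.Nodup.of_map Prod.fst
    rw [hL, pv_map_fst_filterMap]
    exact hs.filter _
  have hysnodup : ys.Nodup := (pvTlit_perm.nodup_iff.mpr (by decide)).filter _
  have hmem : ∀ p : String × Int, p ∈ ys ↔ p ∈ L := by
    rintro ⟨m, v⟩
    rw [hys, hL, List.mem_filter, List.mem_filterMap]
    simp only [pv_mem_Tlit, Option.map_eq_some_iff, decide_eq_true_eq]
    constructor
    · rintro ⟨hscore, hmem⟩
      exact ⟨m, hmem, v, hscore, rfl⟩
    · rintro ⟨m', hm', v', hscore, he⟩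
      injection he with h1 h2
      subst h1; subst h2
      exact ⟨hscore, hm'⟩
  have hperm : ys.Perm L := (List.perm_ext_iff_of_nodup hysnodup hLnodup).mpr
    (fun p => hmem p)
  have hpw : ys.Pairwise (fun a b => a.2 < b.2) :=
    pvTlit_pairwise.sublist List.filter_sublist
  rw [show PySem.List.sorted L (fun p => p.2) = ys from
    PySem.List.sorted_eq_of_perm_of_pairwise_lt L ys (fun p => p.2) hperm hpw, hys, List.filter_map]
  rfl

-- ===== VERDICT (by name: the statement is the Claim_ definition above) =====
theorem get_models_with_data_spec : Claim_equal_get_models_with_data := by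
  intro rbc _
  unfold Spec_get_models_with_data
  simp only [get_models_with_data, get_models_with_data_alt, pv_foldl_scores, List.nil_append]
  rw [pv_sorted_filterMap (pvCollectA rbc) (pvCollectA_nodup rbc), pvSortedModels_eq]
  apply List.filter_congr
  intro m _
  have hiff : (m ∈ pvCollectA rbc) ↔
      m ∈ PySem.Set.ofList
        ((rbc.map (·.2)).flatMap (fun baselines =>
          (baselines.map (·.2)).flatMap (fun strongs =>
            (strongs.filter (fun p => !p.2.isEmpty)).map (·.1)))) := by
    rw [pvCollectA_mem, PySem.Set.mem_ofList, pvCollectB_mem]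
  rw [Bool.eq_iff_iff]
  simp only [decide_eq_true_eq, PySem.Set.contains_iff]
  exact hiff
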